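-- pv_equiv track=rewrite | github.com/cristcorrea/ejercicios_python | Clase04/busqueda_en_listas.py | busqueda_lineal_ordenada
-- ===== SOURCE A (Python) =====
-- def busqueda_lineal_ordenada(lista, e):
--     pos = -1
--     lista.sort()
--     for i, z in enumerate(lista):
--         if z == e:
--             pos = i
--             break
--         elif z >= e:
--             break
--     return pos
-- ===== SOURCE B (Python) =====
-- def busqueda_lineal_ordenada(lista, e):
--     # Same in-place sort as the original, then a hand-written binary search
--     # (bisect_left) instead of the linear scan.
--     lista.sort()
--     lo, hi = 0, len(lista)
--     while lo < hi:
--         mid = (lo + hi) // 2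
--         if lista[mid] < e:
--             lo = mid + 1
--         else:
--             hi = mid
--     return lo if lo < len(lista) and lista[lo] == e else -1
-- ===== Notes on version B (the rewrite author's own statement) =====
-- stated objective: alternative
-- what changed: After the same in-place sort, the leftmost occurrence is located by a hand-written bisect_left binary search with an insertion-point check instead of a linear scan with early break.
import Mathlib
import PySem

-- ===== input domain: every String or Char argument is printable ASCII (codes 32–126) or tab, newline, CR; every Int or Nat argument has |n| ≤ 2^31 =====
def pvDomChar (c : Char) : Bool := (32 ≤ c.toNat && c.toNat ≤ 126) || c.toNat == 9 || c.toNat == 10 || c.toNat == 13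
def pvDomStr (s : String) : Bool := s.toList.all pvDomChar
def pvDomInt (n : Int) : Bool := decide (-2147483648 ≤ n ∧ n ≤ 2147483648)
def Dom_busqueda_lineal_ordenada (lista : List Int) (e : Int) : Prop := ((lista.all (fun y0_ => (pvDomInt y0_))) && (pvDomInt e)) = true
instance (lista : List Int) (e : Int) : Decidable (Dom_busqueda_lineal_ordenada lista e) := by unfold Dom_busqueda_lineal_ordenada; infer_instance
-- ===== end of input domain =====

-- B replaces A's post-sort linear scan by a hand-written bisect_left binary search
-- (objective: alternative). Both versions sort `lista` in place in Python; the
-- equivalence proved here is about the RETURN value (the in-place sort is identical).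

-- ===== PORT A =====
-- the `for i, z in enumerate(lista)` loop with its two breaks; `pos` is -1 unless set
def pvScanA (e : Int) : List Int → Nat → Int
  | [], _ => -1
  | z :: t, i => if z = e then (i : Int) else if e ≤ z then -1 else pvScanA e t (i + 1)

def busqueda_lineal_ordenada (lista : List Int) (e : Int) : Int :=
  pvScanA e (PySem.List.sorted lista (fun x => x) false) 0

-- ===== PORT B =====
-- Source B's `while lo < hi` binary-search loop, step for step (getD is safe: mid < hi ≤ len);
-- `fuel` bounds the iteration count by hi - lo so the recursion is structural (kernel-reducible)
def pvBlLoop (s : List Int) (e : Int) : Nat → Nat → Nat → Nat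
  | 0, lo, _ => lo
  | fuel + 1, lo, hi =>
    if lo < hi then
      let mid := (lo + hi) / 2
      if s.getD mid 0 < e then pvBlLoop s e fuel (mid + 1) hi else pvBlLoop s e fuel lo mid
    else lo

def busqueda_lineal_ordenada_alt (lista : List Int) (e : Int) : Int :=
  let s := PySem.List.sorted lista (fun x => x) false
  let lo := pvBlLoop s e s.length 0 s.length
  if h : lo < s.length then (if s[lo] = e then (lo : Int) else -1) else -1

-- ===== PRECONDITION & SPEC =====
def Spec_busqueda_lineal_ordenada (lista : List Int) (e : Int) (out : Int) : Prop := out = busqueda_lineal_ordenada_alt lista e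
instance (lista : List Int) (e : Int) (out : Int) : Decidable (Spec_busqueda_lineal_ordenada lista e out) := by unfold Spec_busqueda_lineal_ordenada; infer_instance

-- ===== CLAIM (what is proved, stated in full; the proofs are below) =====
def Claim_equal_busqueda_lineal_ordenada : Prop := ∀ (lista : List Int) (e : Int), Dom_busqueda_lineal_ordenada lista e → Spec_busqueda_lineal_ordenada lista e (busqueda_lineal_ordenada lista e)

-- ===== LEMMAS AND PROOFS =====

-- Source B's loop reaches any c with the bisect_left invariants (c = number of elements < e)
theorem pvBlLoop_eq (s : List Int) (e : Int) (c : Nat)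
    (hlt : ∀ (j : Nat) (hj : j < s.length), j < c → s[j] < e)
    (hge : ∀ (j : Nat) (hj : j < s.length), c ≤ j → e ≤ s[j]) :
    ∀ (n lo hi : Nat), hi - lo ≤ n → lo ≤ c → c ≤ hi → hi ≤ s.length →
      pvBlLoop s e n lo hi = c := by
  intro n
  induction n with
  | zero =>
    intro lo hi hn h1 h2 h3
    simp only [pvBlLoop]
    omega
  | succ n ih =>
    intro lo hi hn h1 h2 h3
    simp only [pvBlLoop]
    by_cases hlh : lo < hi
    · simp only [hlh, if_true]
      have hmid : (lo + hi) / 2 < s.length := by omega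
      have hg : s.getD ((lo + hi) / 2) 0 = s[(lo + hi) / 2] := List.getD_eq_getElem s 0 hmid
      by_cases hc : s.getD ((lo + hi) / 2) 0 < e
      · have hmc : (lo + hi) / 2 < c := by
          by_contra hcc
          have := hge ((lo + hi) / 2) hmid (by omega)
          rw [hg] at hc; omega
        simp only [hc, if_true]
        exact ih ((lo + hi) / 2 + 1) hi (by omega) (by omega) h2 h3
      · have hmc : c ≤ (lo + hi) / 2 := by
          by_contra hcc
          have := hlt ((lo + hi) / 2) hmid (by omega)
          rw [hg] at hc; omega
        simp only [hc, if_false]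
        exact ih lo ((lo + hi) / 2) (by omega) h1 hmc (by omega)
    · simp [hlh]; omega

-- A's scan on a sorted list returns i + c where c has the bisect_left invariants (or -1)
theorem pvScanA_eq (e : Int) :
    ∀ (s : List Int) (c i : Nat), s.Pairwise (· ≤ ·) → c ≤ s.length →
      (∀ (j : Nat) (hj : j < s.length), j < c → s[j] < e) →
      (∀ (j : Nat) (hj : j < s.length), c ≤ j → e ≤ s[j]) →
      pvScanA e s i =
        if h : c < s.length then (if s[c] = e then ((i : Int) + (c : Int)) else -1) else -1 := by
  intro s
  induction s with
  | nil =>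
    intro c i _ hc _ _
    simp [pvScanA]
  | cons z t ih =>
    intro c i hp hc hlt hge
    have hpt : t.Pairwise (· ≤ ·) := hp.tail
    match c with
    | 0 =>
      have hez : e ≤ z := hge 0 (by simp) (by omega)
      by_cases hzet : z = e
      · simp [pvScanA, hzet]
      · have : ¬ ((z : Int) < e) := by omega
        simp [pvScanA, hzet, hez]
    | Nat.succ k =>
      have hze : z < e := hlt 0 (by simp) (by omega)
      have hzne : z ≠ e := by omega
      have hnez : ¬ e ≤ z := by omega
      have step : pvScanA e (z :: t) i = pvScanA e t (i + 1) := by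
        simp [pvScanA, hzne, hnez]
      rw [step, ih k (i + 1) hpt (by simpa using hc)
        (fun j hj hjk => by
          have := hlt (j + 1) (by simpa using Nat.succ_lt_succ hj) (by omega)
          simpa using this)
        (fun j hj hkj => by
          have := hge (j + 1) (by simpa using Nat.succ_lt_succ hj) (by omega)
          simpa using this)]
      by_cases hkl : k < t.length
      · have hkl' : k + 1 < (z :: t).length := by simpa using Nat.succ_lt_succ hkl
        have hgel : (z :: t)[(k + 1 : Nat)]'hkl' = t[k] := by simp
        simp only [hkl, hkl', dif_pos, hgel]
        by_cases he : t[k] = e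
        · simp [he]; ring
        · simp [he]
      · have : ¬ (k + 1 < (z :: t).length) := by simp; omega
        simp [hkl]

-- ===== VERDICT (by name: the statement is the Claim_ definition above) =====
theorem busqueda_lineal_ordenada_spec : Claim_equal_busqueda_lineal_ordenada := by
  intro lista e _
  unfold Spec_busqueda_lineal_ordenada busqueda_lineal_ordenada busqueda_lineal_ordenada_alt
  set s := PySem.List.sorted lista (fun x => x) false with hs
  have hp : s.Pairwise (· ≤ ·) := PySem.List.sorted_pairwise lista (fun x => x)
  obtain ⟨h1, h2, h3⟩ := PySem.List.bisectLeft_spec s e hp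
  set c := PySem.List.bisectLeft s e with hcdef
  have hb : pvBlLoop s e s.length 0 s.length = c :=
    pvBlLoop_eq s e c h2 h3 s.length 0 s.length (by omega) (by omega) h1 (le_refl _)
  have ha := pvScanA_eq e s c 0 hp h1 h2 h3
  rw [ha]
  simp only [hb]
  by_cases hcl : c < s.length
  · simp only [hcl, dif_pos]
    by_cases he : s[c] = e <;> simp [he]
  · simp [hcl]
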